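-- pv_equiv track=rewrite | github.com/notken12/usaco | 1.4/barn1/barn1.py | get_boards
-- ===== SOURCE A (Python) =====
-- def get_gaps(_stalls: list) -> list:
--     gaps = []
--     for i in range(len(_stalls) - 1):
--         curr = _stalls[i]
--         _next = _stalls[i + 1]
--         if _next - curr > 1:
--             gaps.append([curr + 1, _next - 1])
--     return gaps
--
-- def sort_gaps_by_size_desc(_gaps: list) -> list:
--     _gaps.sort(key=lambda a: a[1] - a[0], reverse=True)
--     return _gaps
--
-- def sort_gaps_by_start_asc(_gaps:list) -> list:
--     _gaps.sort(key=lambda a: a[0])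
--     return _gaps
--
-- def cut_board(board: list, gap: list) -> list:
--     board1 = [board[0], gap[0] - 1]
--     board2 = [gap[1] + 1, board[1]]
--     return [board1, board2]
--
-- def get_boards(_stalls: list, _max_boards: int) -> list:
--     boards = []
--     if _max_boards >= len(_stalls):
--         return [[x, x] for x in _stalls]
--
--     gaps = sort_gaps_by_size_desc(get_gaps(_stalls))
--     cut_marks = sort_gaps_by_start_asc(gaps[:_max_boards - 1])  # get first n boards and sort them asc
--
--     initial_board = [_stalls[0], _stalls[-1]]
--     boards.append(initial_board)
--     for i in range(_max_boards - 1):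
--         cut = cut_board(boards[i], cut_marks[i])
--         boards[i] = cut[0]
--         boards.append(cut[1])
--     return boards
-- ===== SOURCE B (Python) =====
-- def get_boards(_stalls: list, _max_boards: int) -> list:
--     if _max_boards >= len(_stalls):
--         return [[x, x] for x in _stalls]
--     k = _max_boards - 1
--     best = []  # running top-k gaps, kept ordered by size desc (ties: discovery order)
--     if k > 0:
--         for a, b in zip(_stalls, _stalls[1:]):
--             if b - a > 1:
--                 size = (b - 1) - (a + 1)
--                 j = 0
--                 while j < len(best) and best[j][1] - best[j][0] >= size:
--                     j += 1
--                 best.insert(j, [a + 1, b - 1])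
--                 if len(best) > k:
--                     best.pop()
--     cuts = sorted(best, key=lambda g: g[0])
--     boards = []
--     start = _stalls[0]
--     for c in cuts:
--         boards.append([start, c[0] - 1])
--         start = c[1] + 1
--     boards.append([start, _stalls[-1]])
--     return boards
-- ===== Notes on version B (the rewrite author's own statement) =====
-- stated objective: alternative
-- what changed: B replaces A's pipeline (build the full gap list, stable-sort all gaps by size descending, slice the first k-1, re-sort by start, then repeatedly split the last board in place by index) by one streaming pass over adjacent stall pairs that maintains a bounded best-(k-1) gap buffer via ordered insertion and eviction (online top-k selection, no global sort), then emits the boards with a single start-accumulator loop over the sorted cuts.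
import Mathlib
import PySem

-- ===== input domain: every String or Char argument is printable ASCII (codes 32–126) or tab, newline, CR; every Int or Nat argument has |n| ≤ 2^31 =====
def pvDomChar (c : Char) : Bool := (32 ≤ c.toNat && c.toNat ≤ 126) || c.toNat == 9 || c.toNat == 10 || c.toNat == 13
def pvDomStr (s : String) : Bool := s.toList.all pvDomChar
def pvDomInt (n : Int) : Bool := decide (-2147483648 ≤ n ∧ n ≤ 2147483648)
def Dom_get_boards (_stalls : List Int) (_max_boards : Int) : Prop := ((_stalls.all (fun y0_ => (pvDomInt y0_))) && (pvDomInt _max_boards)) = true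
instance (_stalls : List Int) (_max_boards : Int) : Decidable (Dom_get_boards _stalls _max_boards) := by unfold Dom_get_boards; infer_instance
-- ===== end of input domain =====

-- B replaces A's sort-slice-sort-and-split pipeline by one streaming pass that keeps a
-- bounded best-(k-1) gap buffer (ordered insertion + eviction) and emits the boards with a
-- single accumulator loop over the cuts (objective: alternative; not faster).


-- ===== PORT A =====
def get_gaps (_stalls : List Int) : List (List Int) :=
  (PySem.List.pyRange 0 (PySem.List.len _stalls - 1) 1).foldl (fun gaps i =>
    let curr := PySem.List.pyGetD _stalls i 0
    let _next := PySem.List.pyGetD _stalls (i + 1) 0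
    if _next - curr > 1 then gaps ++ [[curr + 1, _next - 1]] else gaps) []

def sort_gaps_by_size_desc (_gaps : List (List Int)) : List (List Int) :=
  PySem.List.sorted _gaps (fun a => PySem.List.pyGetD a 1 0 - PySem.List.pyGetD a 0 0) true

def sort_gaps_by_start_asc (_gaps : List (List Int)) : List (List Int) :=
  PySem.List.sorted _gaps (fun a => PySem.List.pyGetD a 0 0) false

def cut_board (board : List Int) (gap : List Int) : List (List Int) :=
  let board1 := [PySem.List.pyGetD board 0 0, PySem.List.pyGetD gap 0 0 - 1]
  let board2 := [PySem.List.pyGetD gap 1 0 + 1, PySem.List.pyGetD board 1 0]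
  [board1, board2]

-- indexing ports use pyGetD: Pre_get_boards excludes exactly the inputs where the Python raises IndexError
def get_boards (_stalls : List Int) (_max_boards : Int) : List (List Int) :=
  if _max_boards ≥ PySem.List.len _stalls then
    _stalls.map (fun x => [x, x])
  else
    let gaps := sort_gaps_by_size_desc (get_gaps _stalls)
    let cut_marks := sort_gaps_by_start_asc (PySem.List.slice gaps none (some (_max_boards - 1)))
    let initial_board := [PySem.List.pyGetD _stalls 0 0, PySem.List.pyGetD _stalls (-1) 0]
    (PySem.List.pyRange 0 (_max_boards - 1) 1).foldl (fun boards i =>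
      let cut := cut_board (PySem.List.pyGetD boards i []) (PySem.List.pyGetD cut_marks i [])
      PySem.List.pySetD boards i (PySem.List.pyGetD cut 0 []) ++ [PySem.List.pyGetD cut 1 []])
      [initial_board]

-- ===== PORT B =====
-- Source B's inner while-loop + list.insert: place g before the first kept gap of smaller size
def insGap (best : List (List Int)) (g : List Int) (size : Int) : List (List Int) :=
  match best with
  | [] => [g]
  | h :: t =>
    if PySem.List.pyGetD h 1 0 - PySem.List.pyGetD h 0 0 ≥ size then h :: insGap t g size
    else g :: h :: t

def get_boards_alt (_stalls : List Int) (_max_boards : Int) : List (List Int) :=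
  if _max_boards ≥ PySem.List.len _stalls then
    _stalls.map (fun x => [x, x])
  else
    let k := _max_boards - 1
    -- streaming pass over adjacent stall pairs; best.pop() is ported as dropLast
    let best := if k > 0 then
        (_stalls.zip (PySem.List.slice _stalls (some 1) none)).foldl
          (fun best p =>
            if p.2 - p.1 > 1 then
              let size := (p.2 - 1) - (p.1 + 1)
              let b' := insGap best [p.1 + 1, p.2 - 1] size
              if (b'.length : Int) > k then b'.dropLast else b'
            else best) []
      else []
    let cuts := PySem.List.sorted best (fun g => PySem.List.pyGetD g 0 0) false
    -- Source B's boards/start accumulator loop over cuts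
    let st := cuts.foldl
      (fun st c => (st.1 ++ [[st.2, PySem.List.pyGetD c 0 0 - 1]], PySem.List.pyGetD c 1 0 + 1))
      (([] : List (List Int)), PySem.List.pyGetD _stalls 0 0)
    st.1 ++ [[st.2, PySem.List.pyGetD _stalls (-1) 0]]

-- ===== PRECONDITION & SPEC =====
-- Pre_ is exactly the non-raising domain of A: A raises IndexError when stalls is empty and
-- _max_boards < 0, or when there are fewer than _max_boards - 1 gaps to cut.
def Pre_get_boards (_stalls : List Int) (_max_boards : Int) : Prop :=
  _max_boards ≥ _stalls.length ∨
    (_stalls ≠ [] ∧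
      _max_boards - 1 ≤ ((_stalls.zip _stalls.tail).countP (fun p => decide (p.2 - p.1 > 1)) : Int))
instance (_stalls : List Int) (_max_boards : Int) : Decidable (Pre_get_boards _stalls _max_boards) := by
  unfold Pre_get_boards; infer_instance

def pvWitness_get_boards : List Int × Int := ([1, 2, 5], 2)

def Spec_get_boards (_stalls : List Int) (_max_boards : Int) (out : List (List Int)) : Prop := out = get_boards_alt _stalls _max_boards
instance (_stalls : List Int) (_max_boards : Int) (out : List (List Int)) : Decidable (Spec_get_boards _stalls _max_boards out) := by unfold Spec_get_boards; infer_instance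

-- ===== CLAIM (what is proved, stated in full; the proofs are below) =====
def Claim_equal_get_boards : Prop := ∀ (_stalls : List Int) (_max_boards : Int), Dom_get_boards _stalls _max_boards → Pre_get_boards _stalls _max_boards → Spec_get_boards _stalls _max_boards (get_boards _stalls _max_boards)

-- ===== LEMMAS AND PROOFS =====

-- the segment list obtained by cutting [s, e] at the chosen gaps, left to right
def pvSegs (start : Int) (rest : List (List Int)) (e : Int) : List (List Int) :=
  match rest with
  | [] => [[start, e]]
  | c :: t => [start, PySem.List.pyGetD c 0 0 - 1] :: pvSegs (PySem.List.pyGetD c 1 0 + 1) t e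

-- B's accumulator loop over the cuts produces exactly these segments
lemma pv_segs_fold : ∀ (cuts : List (List Int)) (acc : List (List Int)) (s e : Int),
    (cuts.foldl
        (fun st c => (st.1 ++ [[st.2, PySem.List.pyGetD c 0 0 - 1]], PySem.List.pyGetD c 1 0 + 1))
        (acc, s)).1
      ++ [[(cuts.foldl
        (fun st c => (st.1 ++ [[st.2, PySem.List.pyGetD c 0 0 - 1]], PySem.List.pyGetD c 1 0 + 1))
        (acc, s)).2, e]]
      = acc ++ pvSegs s cuts e := by
  intro cuts
  induction cuts with
  | nil => intro acc s e; simp [pvSegs]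
  | cons c t ih =>
    intro acc s e
    simp only [List.foldl_cons]
    rw [ih]
    simp [pvSegs]

-- the size key B's buffer is ordered by (descending), written as an ascending key
def pvKey (g : List Int) : Int := PySem.List.pyGetD g 0 0 - PySem.List.pyGetD g 1 0

lemma pv_filter_map {α β : Type} (c : α → Prop) [DecidablePred c] (f : α → β) (l : List α) :
    (l.filter (fun a => decide (c a))).map f
      = l.filterMap (fun a => if c a then some (f a) else none) := by
  induction l with
  | nil => rfl
  | cons a t ih => by_cases h : c a <;> simp [h, ih]

lemma pv_gaps_eq (s : List Int) :
    get_gaps s = (s.zip (PySem.List.slice s (some 1) none)).filterMap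
      (fun p => if p.2 - p.1 > 1 then some [p.1 + 1, p.2 - 1] else none) := by
  rw [PySem.List.slice_from_one]
  rw [← pv_filter_map (c := fun p : Int × Int => p.2 - p.1 > 1)
      (f := fun p : Int × Int => [p.1 + 1, p.2 - 1])]
  unfold get_gaps
  rw [PySem.List.foldl_append_ite
      (p := fun i => PySem.List.pyGetD s (i+1) 0 - PySem.List.pyGetD s i 0 > 1)
      (f := fun i => [PySem.List.pyGetD s i 0 + 1, PySem.List.pyGetD s (i+1) 0 - 1])]
  by_cases hs : s = []
  · subst hs; rfl
  · have hpos : 0 < s.length := List.length_pos_of_ne_nil hs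
    have hPl : (s.zip s.tail).length = s.length - 1 := by
      simp [List.length_zip, List.length_tail]
    have h1 : PySem.List.len s - 1 = ((s.zip s.tail).length : Int) := by
      rw [PySem.List.len_eq, hPl]; omega
    rw [h1]
    have hmap : (PySem.List.pyRange 0 ((s.zip s.tail).length : Int) 1).map
        (fun j => PySem.List.pyGetD (s.zip s.tail) j ((0 : Int), (0 : Int))) = s.zip s.tail :=
      PySem.List.map_pyGetD_pyRange_zero' (s.zip s.tail) ((0 : Int), (0 : Int))
    conv_rhs => rw [← hmap]
    rw [List.filter_map, List.map_map]
    have hg : ∀ i ∈ PySem.List.pyRange 0 ((s.zip s.tail).length : Int) 1,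
        PySem.List.pyGetD s i 0 = (PySem.List.pyGetD (s.zip s.tail) i ((0:Int),(0:Int))).1 ∧
        PySem.List.pyGetD s (i+1) 0 = (PySem.List.pyGetD (s.zip s.tail) i ((0:Int),(0:Int))).2 := by
      intro i hi
      rw [PySem.List.mem_pyRange_one] at hi
      have hiP : i.toNat < (s.zip s.tail).length := by omega
      have his : i.toNat < s.length := by omega
      have his1 : i.toNat + 1 < s.length := by omega
      have hit : i.toNat < s.tail.length := by rw [List.length_tail]; omega
      have e1 : PySem.List.pyGetD (s.zip s.tail) i ((0:Int),(0:Int)) = (s.zip s.tail)[i.toNat]'hiP :=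
        PySem.List.pyGetD_eq_getElem _ _ (by omega) hi.2
      have e2 : (s.zip s.tail)[i.toNat]'hiP = (s[i.toNat]'his, s.tail[i.toNat]'hit) :=
        List.getElem_zip
      have e3 : s.tail[i.toNat]'hit = s[i.toNat + 1]'his1 := List.getElem_tail hit
      have e4 : PySem.List.pyGetD s i 0 = s[i.toNat]'his :=
        PySem.List.pyGetD_eq_getElem _ _ (by omega) (by omega)
      have e5 : PySem.List.pyGetD s (i+1) 0 = s[i.toNat + 1]'his1 := by
        rw [PySem.List.pyGetD_eq_getElem s 0 (by omega) (by omega)]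
        simp only [show (i+1).toNat = i.toNat + 1 from by omega]
      exact ⟨by rw [e4, e1, e2], by rw [e5, e1, e2, e3]⟩
    rw [List.filter_congr (q := fun i => decide
        ((PySem.List.pyGetD (s.zip s.tail) i ((0:Int),(0:Int))).2
          - (PySem.List.pyGetD (s.zip s.tail) i ((0:Int),(0:Int))).1 > 1)) ?_]
    · rw [List.nil_append]
      apply List.map_congr_left
      intro i hi
      have hi' := List.mem_of_mem_filter hi
      have := hg i hi'
      simp only [Function.comp]
      rw [this.1, this.2]
    · intro i hi
      have := hg i hi
      simp only [decide_eq_decide]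
      rw [this.1, this.2]

lemma pv_sort_desc (l : List (List Int)) :
    sort_gaps_by_size_desc l = PySem.List.sorted l pvKey false := by
  unfold sort_gaps_by_size_desc
  rw [PySem.List.sorted_rev_eq_foldl_insertBy, PySem.List.sorted_eq_foldl_insertBy]
  have h : (fun a b : List Int => decide
        (PySem.List.pyGetD b 1 0 - PySem.List.pyGetD b 0 0
          < PySem.List.pyGetD a 1 0 - PySem.List.pyGetD a 0 0))
      = (fun a b : List Int => decide (pvKey a < pvKey b)) := by
    funext a b
    simp only [pvKey, decide_eq_decide]
    omega
  rw [h]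

-- B's ordered insertion IS the insertion step of the stable sort by pvKey
lemma pv_insGap_eq (best : List (List Int)) (g : List Int) :
    insGap best g (PySem.List.pyGetD g 1 0 - PySem.List.pyGetD g 0 0)
      = PySem.List.insertBy (fun a b => decide (pvKey a < pvKey b)) g best := by
  induction best with
  | nil => rfl
  | cons h t ih =>
    simp only [insGap, PySem.List.insertBy]
    by_cases hc : PySem.List.pyGetD h 1 0 - PySem.List.pyGetD h 0 0
        ≥ PySem.List.pyGetD g 1 0 - PySem.List.pyGetD g 0 0
    · rw [if_pos hc, if_neg (by simp only [pvKey, decide_eq_true_eq]; omega), ih]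
    · rw [if_neg hc, if_pos (by simp only [pvKey, decide_eq_true_eq]; omega)]

lemma pv_dropLast_take {a : Type} (t : List a) (m : Nat) (h : m < t.length) :
    (t.take (m + 1)).dropLast = t.take m := by
  by_cases h2 : m + 1 < t.length
  · rw [List.dropLast_take h2]; simp
  · have he : t.length = m + 1 := by omega
    rw [List.take_of_length_le (by omega), List.dropLast_eq_take, he]
    simp

-- truncating after an ordered insertion commutes with take
lemma pv_take_insGap (k : Nat) (S : List (List Int)) (g : List Int) (sz : Int) :
    (let b' := insGap (S.take k) g sz; if b'.length > k then b'.dropLast else b')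
      = (insGap S g sz).take k := by
  induction S generalizing k with
  | nil =>
    cases k with
    | zero => simp [insGap]
    | succ m => simp [insGap]
  | cons h t ih =>
    cases k with
    | zero => simp [insGap]
    | succ m =>
      simp only [List.take_succ_cons, insGap]
      by_cases hc : PySem.List.pyGetD h 1 0 - PySem.List.pyGetD h 0 0 ≥ sz
      · rw [if_pos hc, if_pos hc, List.take_succ_cons]
        have := ih m
        simp only at this
        by_cases hl : (insGap (t.take m) g sz).length > m
        · have hl' : (h :: insGap (t.take m) g sz).length > m + 1 := by
            simp [List.length_cons]; omega
          have hne : insGap (t.take m) g sz ≠ [] := by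
            intro hnil; rw [hnil] at hl; simp at hl
          rw [if_pos hl', List.dropLast_cons_of_ne_nil hne]
          rw [if_pos hl] at this
          rw [this]
        · have hl' : ¬ (h :: insGap (t.take m) g sz).length > m + 1 := by
            simp [List.length_cons]; omega
          rw [if_neg hl', if_neg hl] at *
          rw [this]
      · rw [if_neg hc, if_neg hc]
        by_cases hm : m ≤ t.length
        · have hlen : (g :: h :: t.take m).length > m + 1 := by
            simp [List.length_take]; omega
          rw [if_pos hlen]
          cases m with
          | zero => simp
          | succ m' =>
            have htk : (t.take (m' + 1)).length = m' + 1 := by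
              simp [List.length_take]; omega
            have hne : t.take (m' + 1) ≠ [] := by
              intro hnil; rw [hnil] at htk; simp at htk
            rw [show (g :: h :: t.take (m' + 1)).dropLast
                = g :: h :: (t.take (m' + 1)).dropLast by
                  simp [List.dropLast_cons_of_ne_nil, hne]]
            rw [pv_dropLast_take t m' (by omega)]
            simp [List.take_succ_cons]
        · have htk : t.take m = t := List.take_of_length_le (by omega)
          have hlen : ¬ (g :: h :: t.take m).length > m + 1 := by
            simp [htk]; omega
          rw [if_neg hlen, htk]
          rw [List.take_of_length_le (by simp; omega)]

-- the streaming bounded buffer equals take k of the full insertion sort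
lemma pv_fold_bounded (k : Nat) (l : List (List Int)) : ∀ (S : List (List Int)),
    l.foldl (fun best g =>
        let b' := insGap best g (PySem.List.pyGetD g 1 0 - PySem.List.pyGetD g 0 0)
        if b'.length > k then b'.dropLast else b') (S.take k)
      = (l.foldl (fun acc g =>
          insGap acc g (PySem.List.pyGetD g 1 0 - PySem.List.pyGetD g 0 0)) S).take k := by
  induction l with
  | nil => intro S; rfl
  | cons g t ih =>
    intro S
    simp only [List.foldl_cons]
    rw [pv_take_insGap]
    exact ih _

-- pushing the filter condition of B's streaming loop out of the fold
lemma pv_fold_zip (kn : Nat) (l : List (Int × Int)) (init : List (List Int)) :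
    l.foldl (fun best p =>
        if p.2 - p.1 > 1 then
          let b' := insGap best [p.1 + 1, p.2 - 1]
            (PySem.List.pyGetD ([p.1 + 1, p.2 - 1] : List Int) 1 0
              - PySem.List.pyGetD ([p.1 + 1, p.2 - 1] : List Int) 0 0)
          if b'.length > kn then b'.dropLast else b'
        else best) init
      = (l.filterMap (fun p => if p.2 - p.1 > 1 then some [p.1 + 1, p.2 - 1] else none)).foldl
          (fun best g =>
            let b' := insGap best g (PySem.List.pyGetD g 1 0 - PySem.List.pyGetD g 0 0)
            if b'.length > kn then b'.dropLast else b') init := by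
  induction l generalizing init with
  | nil => rfl
  | cons a t ih =>
    by_cases h : a.2 - a.1 > 1
    · rw [List.foldl_cons, if_pos h, List.filterMap_cons_some (f := fun p : Int × Int => if p.2 - p.1 > 1 then some [p.1 + 1, p.2 - 1] else none) (if_pos h), List.foldl_cons, ih]
    · rw [List.foldl_cons, if_neg h, List.filterMap_cons_none (f := fun p : Int × Int => if p.2 - p.1 > 1 then some [p.1 + 1, p.2 - 1] else none) (if_neg h), ih]

-- the segment list produced by cutting [s, e] at the chosen gaps, left to right, is pvSegs
lemma pv_pySetD_concat (l : List (List Int)) (x v : List Int) :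
    PySem.List.pySetD (l ++ [x]) (l.length : Int) v = l ++ [v] := by
  simp [PySem.List.pySetD, PySem.List.pySet?, PySem.List.pyIdx?, List.set_append]

lemma pv_getD_concat (l : List (List Int)) (x : List Int) :
    PySem.List.pyGetD (l ++ [x]) (l.length : Int) ([] : List Int) = x := by
  simp [List.getD]

lemma pv_getD_mid (pre rest : List (List Int)) (c : List Int) :
    PySem.List.pyGetD (pre ++ c :: rest) (pre.length : Int) ([] : List Int) = c := by
  simp [List.getD]

set_option maxHeartbeats 1000000 in
lemma pv_loop (CM : List (List Int)) : ∀ (cuts pre done : List (List Int)) (s e : Int),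
    CM = pre ++ cuts → done.length = pre.length →
    (PySem.List.pyRange (done.length : Int) (CM.length : Int) 1).foldl
      (fun boards i =>
        let cut := cut_board (PySem.List.pyGetD boards i []) (PySem.List.pyGetD CM i [])
        PySem.List.pySetD boards i (PySem.List.pyGetD cut 0 []) ++ [PySem.List.pyGetD cut 1 []])
      (done ++ [[s, e]])
    = done ++ pvSegs s cuts e := by
  intro cuts
  induction cuts with
  | nil =>
    intro pre done s e hCM hlen
    rw [PySem.List.pyRange_one_eq_nil
      (show (CM.length : Int) ≤ (done.length : Int) by subst hCM; simp [hlen])]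
    simp [pvSegs]
  | cons c rest ih =>
    intro pre done s e hCM hlen
    have hlt' : done.length < CM.length := by
      subst hCM; rw [hlen, List.length_append, List.length_cons]; omega
    have hlt : (done.length : Int) < (CM.length : Int) := by exact_mod_cast hlt'
    have h2 : PySem.List.pyGetD CM (done.length : Int) ([] : List Int) = c := by
      subst hCM; rw [hlen]; exact pv_getD_mid pre rest c
    have ha : PySem.List.pyGetD ([s, e] : List Int) 0 0 = s := by simp [pysem]
    have hb : PySem.List.pyGetD ([s, e] : List Int) 1 0 = e := by simp [pysem]
    have hc : ∀ a b : List Int, PySem.List.pyGetD ([a, b] : List (List Int)) 0 ([] : List Int) = a := by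
      intro a b; simp [pysem]
    have hd : ∀ a b : List Int, PySem.List.pyGetD ([a, b] : List (List Int)) 1 ([] : List Int) = b := by
      intro a b; simp [pysem]
    rw [PySem.List.pyRange_one_cons hlt]
    simp only [cut_board, hc, hd] at ih ⊢
    simp only [List.foldl_cons, pv_getD_concat, h2, ha, hb, pv_pySetD_concat]
    have h3 : ((done.length : Int) + 1)
        = (((done ++ [[s, PySem.List.pyGetD c 0 0 - 1]]).length : Nat) : Int) := by
      simp
    rw [h3, ih (pre ++ [c]) (done ++ [[s, PySem.List.pyGetD c 0 0 - 1]])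
        (PySem.List.pyGetD c 1 0 + 1) e (by rw [hCM]; simp) (by simp [hlen])]
    simp [pvSegs]

-- ===== VERDICT (by name: the statement is the Claim_ definition above) =====
set_option maxHeartbeats 1000000 in
theorem get_boards_spec : Claim_equal_get_boards := by
  intro s mb _ hpre
  unfold Spec_get_boards get_boards get_boards_alt
  by_cases hbig : mb ≥ PySem.List.len s
  · rw [if_pos hbig, if_pos hbig]
  · have hlen : ¬ (mb ≥ (s.length : Int)) := by simpa [PySem.List.len_eq] using hbig
    rcases hpre with h | ⟨hne, hcnt⟩
    · omega
    rw [if_neg hbig, if_neg hbig]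
    dsimp only
    rw [pv_gaps_eq, pv_sort_desc]
    unfold sort_gaps_by_start_asc
    set gapsB := (s.zip (PySem.List.slice s (some 1) none)).filterMap
      (fun p => if p.2 - p.1 > 1 then some [p.1 + 1, p.2 - 1] else none) with hgapsB
    have hglen : (gapsB.length : Int)
        = ((s.zip s.tail).countP (fun p => decide (p.2 - p.1 > 1)) : Int) := by
      rw [hgapsB, PySem.List.slice_from_one, ← pv_filter_map]
      simp [List.countP_eq_length_filter]
    by_cases hk : mb - 1 > 0
    · rw [if_pos hk]
      -- B's streaming buffer = take (mb-1) of the stable size-desc sort of the gaps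
      have hbest :
          (s.zip (PySem.List.slice s (some 1) none)).foldl
            (fun best p =>
              if p.2 - p.1 > 1 then
                let size := (p.2 - 1) - (p.1 + 1)
                let b' := insGap best [p.1 + 1, p.2 - 1] size
                if (b'.length : Int) > mb - 1 then b'.dropLast else b'
              else best) []
          = (PySem.List.sorted gapsB pvKey false).take (mb - 1).toNat := by
        have hfun : (fun (best : List (List Int)) (p : Int × Int) =>
            if p.2 - p.1 > 1 then
              let size := (p.2 - 1) - (p.1 + 1)
              let b' := insGap best [p.1 + 1, p.2 - 1] size
              if (b'.length : Int) > mb - 1 then b'.dropLast else b'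
            else best)
            = (fun best p =>
              if p.2 - p.1 > 1 then
                let b' := insGap best [p.1 + 1, p.2 - 1]
                  (PySem.List.pyGetD ([p.1 + 1, p.2 - 1] : List Int) 1 0
                    - PySem.List.pyGetD ([p.1 + 1, p.2 - 1] : List Int) 0 0)
                if b'.length > (mb - 1).toNat then b'.dropLast else b'
              else best) := by
          funext best p
          by_cases hcnd : p.2 - p.1 > 1
          · rw [if_pos hcnd, if_pos hcnd]
            have hsz : PySem.List.pyGetD ([p.1 + 1, p.2 - 1] : List Int) 1 0
                  - PySem.List.pyGetD ([p.1 + 1, p.2 - 1] : List Int) 0 0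
                = (p.2 - 1) - (p.1 + 1) := by
              simp [pysem]
            rw [hsz]
            set b' := insGap best [p.1 + 1, p.2 - 1] ((p.2 - 1) - (p.1 + 1))
            by_cases hl : (b'.length : Int) > mb - 1
            · rw [if_pos hl, if_pos (by omega)]
            · rw [if_neg hl, if_neg (by omega)]
          · rw [if_neg hcnd, if_neg hcnd]
        rw [hfun, pv_fold_zip, ← hgapsB]
        have h0 : ([] : List (List Int)) = ([] : List (List Int)).take (mb - 1).toNat := by
          simp
        rw [h0, pv_fold_bounded]
        rw [PySem.List.sorted_eq_foldl_insertBy]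
        congr 1
        have hins : (fun (acc : List (List Int)) (g : List Int) =>
              insGap acc g (PySem.List.pyGetD g 1 0 - PySem.List.pyGetD g 0 0))
            = (fun acc g => PySem.List.insertBy (fun a b => decide (pvKey a < pvKey b)) g acc) := by
          funext acc g
          exact pv_insGap_eq acc g
        rw [hins]
      rw [hbest]
      rw [PySem.List.slice_to _ (by omega)]
      have hclen : (((PySem.List.sorted
            ((PySem.List.sorted gapsB pvKey false).take (mb - 1).toNat)
            (fun a => PySem.List.pyGetD a 0 0) false).length : Nat) : Int) = mb - 1 := by
        rw [PySem.List.length_sorted, List.length_take, PySem.List.length_sorted]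
        omega
      have hloop := pv_loop
        (PySem.List.sorted ((PySem.List.sorted gapsB pvKey false).take (mb - 1).toNat)
          (fun a => PySem.List.pyGetD a 0 0) false)
        (PySem.List.sorted ((PySem.List.sorted gapsB pvKey false).take (mb - 1).toNat)
          (fun a => PySem.List.pyGetD a 0 0) false)
        [] [] (PySem.List.pyGetD s 0 0) (PySem.List.pyGetD s (-1) 0) rfl rfl
      simp only [List.nil_append, List.length_nil, Nat.cast_zero] at hloop
      rw [hclen] at hloop
      rw [pv_segs_fold]
      simpa using hloop
    · rw [if_neg hk]
      have hnil := PySem.List.pyRange_one_eq_nil (a := 0) (b := mb - 1) (by omega)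
      simp only [hnil, List.foldl_nil]
      -- A's loop does not run: result is the single initial board; B's cuts are empty
      simp [PySem.List.sorted]
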